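-- pv_equiv track=rewrite | github.com/saultyevil/slashbot | slashbot/helpers/util.py | join_list_max_chars
-- ===== SOURCE A (Python) =====
-- def join_list_max_chars(words: list[str], max_chars: int) -> str:
--     """Join a list of words into a comma-separated list.
--
--     Parameters
--     ----------
--     words : List[str]
--         A list of words to join together
--     max_chars : int
--         The maximum length the output string can be
--
--     Returns
--     -------
--     str
--         The joined words with "..." at the end if max_chars is hit
--
--     """
--     result = ""
--     current_length = 0
--
--     for word in words:
--         if current_length + len(word) > max_chars - 3:
--             if result:
--                 result += "..."
--             break
--         result += word + ", "
--         current_length += len(word)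
--
--     # Remove the trailing ", " if there's anything in the result
--     return result.removesuffix(", ")
-- ===== SOURCE B (Python) =====
-- from bisect import bisect_right
-- from itertools import accumulate
--
--
-- def join_list_max_chars(words: list[str], max_chars: int) -> str:
--     """Prefix-sum table + binary-search cutoff, then a single join."""
--     totals = list(accumulate(len(w) for w in words))
--     cutoff = bisect_right(totals, max_chars - 3)
--     head = ", ".join(words[:cutoff])
--     if 0 < cutoff < len(words):
--         return head + ", ..."
--     return head
-- ===== Notes on version B (the rewrite author's own statement) =====
-- stated objective: alternative
-- what changed: Replaces A's incremental build-and-break loop (string concatenation plus a running length) by a prefix-sum table of word lengths, a bisect_right binary search for the cutoff, one slice-and-join, and a single conditional ellipsis append.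
import Mathlib
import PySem

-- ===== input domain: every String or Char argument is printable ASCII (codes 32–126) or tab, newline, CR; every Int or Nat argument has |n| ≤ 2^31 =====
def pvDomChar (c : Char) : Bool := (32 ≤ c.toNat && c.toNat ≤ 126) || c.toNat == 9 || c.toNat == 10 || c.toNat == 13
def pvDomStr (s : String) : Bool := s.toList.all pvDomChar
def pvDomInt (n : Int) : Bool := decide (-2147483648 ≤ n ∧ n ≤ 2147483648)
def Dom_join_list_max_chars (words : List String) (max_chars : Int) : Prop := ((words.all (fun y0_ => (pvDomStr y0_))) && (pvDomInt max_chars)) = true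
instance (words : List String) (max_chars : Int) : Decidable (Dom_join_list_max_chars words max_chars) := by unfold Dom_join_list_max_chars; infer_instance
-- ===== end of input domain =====

-- B replaces A's incremental build-and-break loop by a prefix-sum table, a bisect cutoff and one join (objective: alternative).

-- ===== PORT A =====
-- str.removesuffix(suf) is not a PySem primitive: ported by hand over List Char —
-- exact: Python returns s[:len(s)-len(suf)] when s ends with suf, else s unchanged.
def pvRemoveSuffix (cs suf : List Char) : List Char :=
  if PySem.Chars.endswith cs suf then cs.take (cs.length - suf.length) else cs

-- the 'for word in words' loop of A: state (result, current_length); break = return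
def joinLoopA (mc : Int) : List String → List Char → Int → List Char
  | [], res, _ => res
  | w :: ws, res, cl =>
    if cl + PySem.Str.len w > mc - 3 then
      (if res.isEmpty then res else res ++ "...".toList)
    else joinLoopA mc ws (res ++ (w.toList ++ ", ".toList)) (cl + PySem.Str.len w)

def join_list_max_chars (words : List String) (max_chars : Int) : String :=
  String.ofList (pvRemoveSuffix (joinLoopA max_chars words [] 0) ", ".toList)

-- ===== PORT B =====
-- itertools.accumulate of the word lengths (running totals)
def pvAccum : List Int → Int → List Int
  | [], _ => []
  | x :: xs, s => (s + x) :: pvAccum xs (s + x)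

def join_list_max_chars_alt (words : List String) (max_chars : Int) : String :=
  let totals := pvAccum (words.map PySem.Str.len) 0
  let cutoff := PySem.List.bisectRight totals (max_chars - 3)
  -- words[:cutoff] with cutoff a bisect result (a Nat) is List.take
  let head := PySem.Chars.join ", ".toList ((words.take cutoff).map String.toList)
  String.ofList (if 0 < cutoff ∧ cutoff < words.length then head ++ ", ...".toList else head)

-- ===== PRECONDITION & SPEC =====
def Spec_join_list_max_chars (words : List String) (max_chars : Int) (out : String) : Prop := out = join_list_max_chars_alt words max_chars
instance (words : List String) (max_chars : Int) (out : String) : Decidable (Spec_join_list_max_chars words max_chars out) := by unfold Spec_join_list_max_chars; infer_instance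

-- ===== CLAIM (what is proved, stated in full; the proofs are below) =====
def Claim_equal_join_list_max_chars : Prop := ∀ (words : List String) (max_chars : Int), Dom_join_list_max_chars words max_chars → Spec_join_list_max_chars words max_chars (join_list_max_chars words max_chars)

-- ===== LEMMAS AND PROOFS =====

-- running totals of nonnegative numbers: all ≥ the start, and nondecreasing
theorem pvAccum_ge (ls : List Int) (h : ∀ a ∈ ls, 0 ≤ a) (s : Int) :
    ∀ t ∈ pvAccum ls s, s ≤ t := by
  induction ls generalizing s with
  | nil => simp [pvAccum]
  | cons x xs ih =>
    intro t ht
    simp only [pvAccum, List.mem_cons] at ht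
    have hx : 0 ≤ x := h x (by simp)
    rcases ht with rfl | ht
    · omega
    · have := ih (fun a ha => h a (by simp [ha])) (s + x) t ht
      omega

theorem pvAccum_pairwise (ls : List Int) (h : ∀ a ∈ ls, 0 ≤ a) (s : Int) :
    (pvAccum ls s).Pairwise (· ≤ ·) := by
  induction ls generalizing s with
  | nil => simp [pvAccum]
  | cons x xs ih =>
    simp only [pvAccum, List.pairwise_cons]
    refine ⟨fun t ht => pvAccum_ge xs (fun a ha => h a (by simp [ha])) (s + x) t ht,
      ih (fun a ha => h a (by simp [ha])) (s + x)⟩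

-- bisect_right on a nondecreasing list counts the elements ≤ x
theorem bisectRight_eq_countP (xs : List Int) (x : Int) (h : xs.Pairwise (· ≤ ·)) :
    PySem.List.bisectRight xs x = xs.countP (fun t => decide (t ≤ x)) := by
  obtain ⟨hk, hlo, hhi⟩ := PySem.List.bisectRight_spec xs x h
  set k := PySem.List.bisectRight xs x with hkdef
  conv_rhs => rw [← List.take_append_drop k xs]
  rw [List.countP_append]
  have h1 : (xs.take k).countP (fun t => decide (t ≤ x)) = k := by
    rw [List.countP_eq_length.2, List.length_take, min_eq_left hk]
    intro a ha
    obtain ⟨i, hi, rfl⟩ := List.mem_iff_getElem.1 ha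
    simp only [List.length_take] at hi
    rw [List.getElem_take]
    simpa using hlo i (by omega) (by omega)
  have h2 : (xs.drop k).countP (fun t => decide (t ≤ x)) = 0 := by
    rw [List.countP_eq_zero]
    intro a ha
    obtain ⟨i, hi, rfl⟩ := List.mem_iff_getElem.1 ha
    simp only [List.length_drop] at hi
    rw [List.getElem_drop]
    have := hhi (k + i) (by omega) (by omega)
    simpa using by omega
  omega

-- characterisation of A's loop via the count of fitting prefix totals
theorem joinLoopA_eq (mc : Int) (ws : List String) (r : List Char) (cl : Int) :
    joinLoopA mc ws r cl =
      (let k := (pvAccum (ws.map PySem.Str.len) cl).countP (fun t => decide (t ≤ mc - 3))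
       let body := r ++ ((ws.take k).map (fun w => w.toList ++ ", ".toList)).flatten
       if k < ws.length then (if body.isEmpty then body else body ++ "...".toList) else body) := by
  induction ws generalizing r cl with
  | nil => simp [joinLoopA, pvAccum]
  | cons w ws ih =>
    simp only [List.map_cons, pvAccum]
    by_cases h : cl + PySem.Str.len w > mc - 3
    · have h0 : (pvAccum (ws.map PySem.Str.len) (cl + PySem.Str.len w)).countP
          (fun t => decide (t ≤ mc - 3)) = 0 := by
        rw [List.countP_eq_zero]
        intro t ht
        have := pvAccum_ge (ws.map PySem.Str.len)
          (by intro a ha; obtain ⟨u, _, rfl⟩ := List.mem_map.1 ha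
              simp [PySem.Str.len_eq]) (cl + PySem.Str.len w) t ht
        simpa using by omega
      have hle : (decide (cl + PySem.Str.len w ≤ mc - 3)) = false :=
        decide_eq_false_iff_not.2 (by omega)
      rw [joinLoopA, if_pos h]
      simp only [List.countP_cons, h0, hle, Bool.false_eq_true, if_false, Nat.zero_add,
        List.take_zero, List.length_cons]
      rw [if_pos (Nat.succ_pos _)]
      simp
    · have h'' : cl + PySem.Str.len w ≤ mc - 3 := by omega
      have hle : (decide (cl + PySem.Str.len w ≤ mc - 3)) = true :=
        decide_eq_true h''
      rw [joinLoopA, if_neg h, ih]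
      simp only [List.countP_cons, hle, if_true, List.take_succ_cons, List.map_cons,
        List.flatten_cons, List.length_cons, Nat.add_lt_add_iff_right, List.append_assoc]

-- join with separators, written as flatten of word++sep pieces
theorem flatten_map_append_sep (sep : List Char) (l : List (List Char)) (hl : l ≠ []) :
    (l.map (fun cs => cs ++ sep)).flatten = PySem.Chars.join sep l ++ sep := by
  induction l with
  | nil => simp at hl
  | cons a t ih =>
    cases t with
    | nil => simp [PySem.Chars.join_singleton]
    | cons b u =>
      rw [PySem.Chars.join_cons_cons]
      simp only [List.map_cons, List.flatten_cons] at ih ⊢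
      rw [ih (by simp)]
      simp [List.append_assoc]

theorem pvRemoveSuffix_append (x s : List Char) : pvRemoveSuffix (x ++ s) s = x := by
  unfold pvRemoveSuffix
  rw [if_pos (by rw [PySem.Chars.endswith_iff]; exact List.suffix_append x s)]
  have : (x ++ s).length - s.length = x.length := by simp
  rw [this, List.take_left]

theorem pvRemoveSuffix_dots (x : List Char) :
    pvRemoveSuffix (x ++ "...".toList) ", ".toList = x ++ "...".toList := by
  unfold pvRemoveSuffix
  rw [if_neg]
  intro hend
  rw [PySem.Chars.endswith_iff] at hend
  obtain ⟨u, hu⟩ := hend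
  have h1 : (x ++ "...".toList).getLast? = some '.' := by
    simp [List.getLast?_append]
  have h2 : (x ++ "...".toList).getLast? = some ' ' := by
    rw [← hu]; simp [List.getLast?_append]
  rw [h1] at h2; exact absurd h2 (by decide)

-- ===== VERDICT (by name: the statement is the Claim_ definition above) =====
theorem join_list_max_chars_spec : Claim_equal_join_list_max_chars := by
  intro words mc _
  unfold Spec_join_list_max_chars
  simp only [join_list_max_chars, join_list_max_chars_alt]
  have hnn : ∀ a ∈ words.map PySem.Str.len, (0:Int) ≤ a := by
    intro a ha; obtain ⟨u, _, rfl⟩ := List.mem_map.1 ha; simp [PySem.Str.len_eq]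
  rw [bisectRight_eq_countP _ _ (pvAccum_pairwise _ hnn 0), joinLoopA_eq]
  set k := (pvAccum (words.map PySem.Str.len) 0).countP (fun t => decide (t ≤ mc - 3)) with hk
  simp only [List.nil_append]
  have hmm : ((words.take k).map (fun w => w.toList ++ ", ".toList)).flatten
      = (((words.take k).map String.toList).map (fun cs => cs ++ ", ".toList)).flatten := by
    rw [List.map_map]; rfl
  by_cases hlen : k < words.length
  · by_cases hk0 : k = 0
    · simp only [hk0, List.take_zero, List.map_nil, List.flatten_nil, List.isEmpty_nil,
        if_true, lt_irrefl, false_and, if_false, PySem.Chars.join_nil]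
      simp [pvRemoveSuffix]
    · have htk : (words.take k).map String.toList ≠ [] := by
        intro hc
        rcases List.take_eq_nil_iff.1 (List.map_eq_nil_iff.1 hc) with h | h
        · exact hk0 h
        · rw [h] at hlen; simp at hlen
      rw [if_pos hlen, hmm, flatten_map_append_sep _ _ htk]
      have hne : ((PySem.Chars.join ", ".toList ((words.take k).map String.toList)
          ++ ", ".toList).isEmpty) = false := by
        simp [List.isEmpty_eq_false_iff]
      rw [hne]
      simp only [Bool.false_eq_true, if_false, List.append_assoc]
      rw [← List.append_assoc, pvRemoveSuffix_dots, if_pos ⟨Nat.pos_of_ne_zero hk0, hlen⟩]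
      congr 1
      simp
  · rw [if_neg hlen, if_neg (by omega)]
    by_cases hw : words.take k = []
    · simp [hw, PySem.Chars.join_nil, pvRemoveSuffix]
    · have htk : (words.take k).map String.toList ≠ [] := by
        intro hc; exact hw (List.map_eq_nil_iff.1 hc)
      rw [hmm, flatten_map_append_sep _ _ htk, pvRemoveSuffix_append]
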